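-- pv_equiv track=rewrite | github.com/greenmaid/adventofcode2024 | day07/day07.py | get_combinations2
-- ===== SOURCE A (Python) =====
-- def get_combinations2(nums):
--     if len(nums) == 1:
--         yield nums[0]
--         return
--     for v in get_combinations2(nums[:-1]):
--         yield nums[-1] + v
--         yield nums[-1] * v
--         yield int(f"{v}{nums[-1]}")
-- ===== SOURCE B (Python) =====
-- def get_combinations2(nums):
--     results = [nums[0]]
--     for last in nums[1:]:
--         new = []
--         for v in results:
--             new.append(last + v)
--             new.append(last * v)
--             new.append(int(f"{v}{last}"))
--         results = new
--     yield from results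
-- ===== Notes on version B (the rewrite author's own statement) =====
-- stated objective: alternative
-- what changed: Replaces the right-recursive generator (recurse on nums[:-1], emit three results per value) by a single iterative left-to-right pass that rebuilds a flat results list for each subsequent number, then yields it.
-- outside the precondition, e.g. on get_combinations2([]): A raises RecursionError, B raises IndexError; on get_combinations2([1, -2]): A raises ValueError, B raises ValueError
import Mathlib
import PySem

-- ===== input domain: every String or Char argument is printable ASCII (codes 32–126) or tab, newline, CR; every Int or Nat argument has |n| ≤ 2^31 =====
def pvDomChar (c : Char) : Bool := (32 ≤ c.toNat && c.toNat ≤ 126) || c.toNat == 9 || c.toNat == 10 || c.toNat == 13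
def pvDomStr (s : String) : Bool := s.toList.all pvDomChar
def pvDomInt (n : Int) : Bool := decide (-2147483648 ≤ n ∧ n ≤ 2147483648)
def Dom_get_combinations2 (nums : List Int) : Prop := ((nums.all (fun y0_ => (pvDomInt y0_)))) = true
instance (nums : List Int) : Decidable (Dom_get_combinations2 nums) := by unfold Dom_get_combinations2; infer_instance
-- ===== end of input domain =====

-- ===== PORT A =====
-- B is an iterative one-pass rewrite of A's right-recursive generator; same values in the same order.
-- Both Pythons are generators; equivalence is about the fully consumed sequence (list of yields).

/-- int(f"{v}{last}") — both Pythons compute this same expression; none (ValueError) only when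
    `last < 0`, which Pre_ excludes; the `getD 0` default is never reached inside Pre_. -/
def pvCat (v last : Int) : Int :=
  (PySem.Int.ofChars? (PySem.Int.toChars v ++ PySem.Int.toChars last)).getD 0

def get_combinations2 (nums : List Int) : List Int :=
  if nums.length = 1 then [PySem.List.pyGetD nums 0 0]          -- yield nums[0]
  else if nums.length = 0 then []                               -- Python recurses forever here (RecursionError); excluded by Pre_
  else
    (get_combinations2 (PySem.List.slice nums none (some (-1)))).flatMap   -- for v in get_combinations2(nums[:-1])
      (fun v =>
        [PySem.List.pyGetD nums (-1) 0 + v,                     -- yield nums[-1] + v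
         PySem.List.pyGetD nums (-1) 0 * v,                     -- yield nums[-1] * v
         pvCat v (PySem.List.pyGetD nums (-1) 0)])              -- yield int(f"{v}{nums[-1]}")
termination_by nums.length
decreasing_by simp [PySem.List.slice_to_neg_one]; omega

-- ===== PORT B =====
def get_combinations2_alt (nums : List Int) : List Int :=
  match nums with
  | [] => []                                                    -- nums[0] raises IndexError; excluded by Pre_
  | h :: t =>                                                   -- results = [nums[0]]; for last in nums[1:]: rebuild
    t.foldl (fun results last =>
        results.flatMap (fun v => [last + v, last * v, pvCat v last])) [h]

-- ===== PRECONDITION & SPEC =====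
-- Pre_ excludes [] (A's recursion never terminates) and lists with a negative element after the
-- first (the f-string "{v}{last}" then embeds a minus sign and int() raises ValueError in A and B).
def Pre_get_combinations2 (nums : List Int) : Prop :=
  nums ≠ [] ∧ ∀ x ∈ nums.tail, 0 ≤ x
instance (nums : List Int) : Decidable (Pre_get_combinations2 nums) := by
  unfold Pre_get_combinations2; infer_instance
def pvWitness_get_combinations2 : List Int := [-3, 10, 19]
def Spec_get_combinations2 (nums : List Int) (out : List Int) : Prop := out = get_combinations2_alt nums
instance (nums : List Int) (out : List Int) : Decidable (Spec_get_combinations2 nums out) := by unfold Spec_get_combinations2; infer_instance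

-- ===== CLAIM (what is proved, stated in full; the proofs are below) =====
def Claim_equal_get_combinations2 : Prop := ∀ (nums : List Int), Dom_get_combinations2 nums → Pre_get_combinations2 nums → Spec_get_combinations2 nums (get_combinations2 nums)

-- ===== LEMMAS AND PROOFS =====
theorem get_combinations2_cons (h : Int) (t : List Int) :
    get_combinations2 (h :: t) =
      t.foldl (fun results last =>
        results.flatMap (fun v => [last + v, last * v, pvCat v last])) [h] := by
  induction t using List.reverseRecOn with
  | nil => simp [get_combinations2]
  | append_singleton s x ih =>
    rw [show h :: (s ++ [x]) = (h :: s) ++ [x] from rfl]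
    rw [get_combinations2]
    rw [if_neg (by simp), if_neg (by simp)]
    simp only [PySem.List.slice_to_neg_one, List.dropLast_concat,
      PySem.List.pyGetD_neg_one_append_singleton,
      List.foldl_append, List.foldl_cons, List.foldl_nil]
    rw [ih]

-- ===== VERDICT (by name: the statement is the Claim_ definition above) =====
theorem get_combinations2_spec : Claim_equal_get_combinations2 := by
  intro nums _ hpre
  unfold Spec_get_combinations2
  match nums with
  | [] => exact absurd rfl hpre.1
  | h :: t => rw [get_combinations2_cons]; rfl
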